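-- pv_equiv track=rewrite | github.com/rhzalavadiya/ShipementDispatch | ProcessFiles/03-02-26-15-41-23/09-02-26-14-45-16/Main-060226-12-26-afterfirstpassexpiry.py | _order_scp_for_broadcast
-- ===== SOURCE A (Python) =====
-- def _order_scp_for_broadcast(rows):
--     running = []
--     others = []
--     for row in rows:
--         if str(row.get("status", "")).upper() == "RUNNING":
--             running.append(row)
--         else:
--             others.append(row)
--     return running + others
-- ===== SOURCE B (Python) =====
-- def _order_scp_for_broadcast(rows):
--     # single stable sort on a 0/1 key: RUNNING rows first, relative order preserved
--     return sorted(rows, key=lambda row: 0 if str(row.get("status", "")).upper() == "RUNNING" else 1)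
-- ===== Notes on version B (the rewrite author's own statement) =====
-- stated objective: simpler
-- what changed: Replaced the two-bucket append loop with a single stable sort on a 0/1 key (RUNNING -> 0), whose stability yields exactly running-first order.
import Mathlib
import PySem

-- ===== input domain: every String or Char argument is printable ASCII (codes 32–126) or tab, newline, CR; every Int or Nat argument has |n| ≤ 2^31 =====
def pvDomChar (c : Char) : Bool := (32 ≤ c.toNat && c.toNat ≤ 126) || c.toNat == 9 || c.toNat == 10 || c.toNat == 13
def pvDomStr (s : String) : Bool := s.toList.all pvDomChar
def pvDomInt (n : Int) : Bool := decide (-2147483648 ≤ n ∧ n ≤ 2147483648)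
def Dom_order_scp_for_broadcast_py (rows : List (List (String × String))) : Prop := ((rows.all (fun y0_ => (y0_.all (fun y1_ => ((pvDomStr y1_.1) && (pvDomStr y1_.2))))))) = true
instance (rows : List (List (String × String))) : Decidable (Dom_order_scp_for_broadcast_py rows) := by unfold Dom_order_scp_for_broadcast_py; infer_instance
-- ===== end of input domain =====

-- ===== PORT A =====
-- B changes the two-bucket append loop into one stable 0/1-key sort (objective: simpler).
-- str(row.get("status","")) : the dict values are already strings, so str() is the identity here.
def pvIsRunning (row : List (String × String)) : Bool :=
  PySem.Str.upper (PySem.Dict.getD ⟨row⟩ "status" "") == "RUNNING"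

def order_scp_for_broadcast_py (rows : List (List (String × String))) : List (List (String × String)) :=
  let acc := rows.foldl
    (fun (acc : List (List (String × String)) × List (List (String × String))) row =>
      if pvIsRunning row then (acc.1 ++ [row], acc.2) else (acc.1, acc.2 ++ [row]))
    ([], [])
  acc.1 ++ acc.2

-- ===== PORT B =====
-- key=lambda row: 0 if str(row.get("status","")).upper() == "RUNNING" else 1
def pvKey (row : List (String × String)) : Int := if pvIsRunning row then 0 else 1

def order_scp_for_broadcast_py_alt (rows : List (List (String × String))) : List (List (String × String)) :=
  PySem.List.sorted rows pvKey

-- ===== PRECONDITION & SPEC =====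
def Spec_order_scp_for_broadcast_py (rows : List (List (String × String))) (out : List (List (String × String))) : Prop := out = order_scp_for_broadcast_py_alt rows
instance (rows : List (List (String × String))) (out : List (List (String × String))) : Decidable (Spec_order_scp_for_broadcast_py rows out) := by unfold Spec_order_scp_for_broadcast_py; infer_instance

-- ===== CLAIM (what is proved, stated in full; the proofs are below) =====
def Claim_equal_order_scp_for_broadcast_py : Prop := ∀ (rows : List (List (String × String))), Dom_order_scp_for_broadcast_py rows → Spec_order_scp_for_broadcast_py rows (order_scp_for_broadcast_py rows)

-- ===== LEMMAS AND PROOFS =====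

theorem pv_insertBy_append (x : List (String × String)) (F0 F1 : List (List (String × String)))
    (h0 : ∀ y ∈ F0, ¬ (pvKey x < pvKey y)) :
    PySem.List.insertBy (fun a b => decide (pvKey a < pvKey b)) x (F0 ++ F1)
      = F0 ++ PySem.List.insertBy (fun a b => decide (pvKey a < pvKey b)) x F1 := by
  induction F0 with
  | nil => rfl
  | cons a t ih =>
      have ha : ¬ (pvKey x < pvKey a) := h0 a (by simp)
      simp [PySem.List.insertBy, ha, ih (fun y hy => h0 y (by simp [hy]))]

theorem pv_loop (rows Z O : List (List (String × String)))
    (hZ : ∀ y ∈ Z, pvIsRunning y = true) (hO : ∀ y ∈ O, pvIsRunning y = false) :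
    rows.foldl (fun acc x => PySem.List.insertBy (fun a b => decide (pvKey a < pvKey b)) x acc) (Z ++ O)
      = (Z ++ rows.filter (fun r => pvIsRunning r)) ++ (O ++ rows.filter (fun r => !pvIsRunning r)) := by
  induction rows generalizing Z O with
  | nil => simp
  | cons x rest ih =>
      by_cases hx : pvIsRunning x = true
      · have hstep : PySem.List.insertBy (fun a b => decide (pvKey a < pvKey b)) x (Z ++ O)
            = (Z ++ [x]) ++ O := by
          have h0 : ∀ y ∈ Z, ¬ (pvKey x < pvKey y) := by
            intro y hy; simp [pvKey, hZ y hy, hx]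
          rw [pv_insertBy_append x Z O h0]
          cases O with
          | nil => simp [PySem.List.insertBy]
          | cons o t =>
              have hb : pvKey x < pvKey o := by simp [pvKey, hx, hO o (by simp)]
              simp [PySem.List.insertBy, hb]
        have hih := ih (Z ++ [x]) O
          (by intro y hy; rcases List.mem_append.mp hy with h | h
              · exact hZ y h
              · simp at h; simpa [h] using hx) hO
        simp only [List.foldl_cons, hstep, List.append_assoc, List.singleton_append] at hih ⊢
        simp only [hih, List.filter_cons, hx, Bool.not_true, ite_true]
        simp
      · have hxf : pvIsRunning x = false := by simpa using hx
        have hstep : PySem.List.insertBy (fun a b => decide (pvKey a < pvKey b)) x (Z ++ O)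
            = Z ++ (O ++ [x]) := by
          rw [← List.append_assoc]
          apply PySem.List.insertBy_of_forall_not_before
          intro y hy
          rcases List.mem_append.mp hy with h | h
          · simp [pvKey, hZ y h, hxf]
          · simp [pvKey, hO y h, hxf]
        have hih := ih Z (O ++ [x]) hZ
          (by intro y hy; rcases List.mem_append.mp hy with h | h
              · exact hO y h
              · simp at h; simpa [h] using hxf)
        simp only [List.foldl_cons, hstep, List.append_assoc, List.singleton_append] at hih ⊢
        simp only [hih, List.filter_cons, hxf, Bool.not_false, ite_true]
        simp

theorem pv_alt_eq_filters (rows : List (List (String × String))) :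
    order_scp_for_broadcast_py_alt rows
      = rows.filter (fun r => pvIsRunning r) ++ rows.filter (fun r => !pvIsRunning r) := by
  unfold order_scp_for_broadcast_py_alt
  rw [PySem.List.sorted_eq_foldl_insertBy]
  simpa using pv_loop rows [] [] (by simp) (by simp)

theorem pv_a_loop (rows : List (List (String × String)))
    (R O : List (List (String × String))) :
    rows.foldl (fun acc row => if pvIsRunning row then (acc.1 ++ [row], acc.2) else (acc.1, acc.2 ++ [row])) (R, O)
      = (R ++ rows.filter (fun r => pvIsRunning r), O ++ rows.filter (fun r => !pvIsRunning r)) := by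
  induction rows generalizing R O with
  | nil => simp
  | cons x rest ih =>
      by_cases hx : pvIsRunning x = true
      · simp [hx, ih]
      · have hxf : pvIsRunning x = false := by simpa using hx
        simp [hxf, ih]

-- ===== VERDICT (by name: the statement is the Claim_ definition above) =====
theorem order_scp_for_broadcast_py_spec : Claim_equal_order_scp_for_broadcast_py := by
  intro rows _
  unfold Spec_order_scp_for_broadcast_py order_scp_for_broadcast_py
  simp only [pv_a_loop, pv_alt_eq_filters]
  simp
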